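-- pv_equiv track=rewrite | github.com/nabuel/Nonograma | paquete/funciones_especificas.py | convertir_coordenada
-- ===== SOURCE A (Python) =====
-- def convertir_coordenada(coordenada: tuple,
--                         coordenada_inicial: tuple,
--                         aumento: int,
--                         matriz: list,
--                         sentido=False)-> int:
--     '''
--     Convierte la coordenada en un valor de fila y columna para la matriz ingresada.
--
--     PARAMETROS: "coordenada" -> valor de la coordenada cliqueada.
--                 "coordenada_inicial" -> coordenada de la esquina superior izquierda del cuadrado/rectángulo.
--                 "aumento" -> el valor con el cual fué aumentando el valor de y
--                 "matriz" -> matriz donde se encuentra el nonograma de forma lógica.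
--                 "sentido" -> cuando es true se convierte la coordenada de la fila. En caso de que sea False convierte la coordenada de la columna.
--
--     RETORNO: El valor de la fila ó de la columna según el sentido.
--              Si el valor es -1 es que esa coordenada no está dentro de la matriz.
--     '''
--     if sentido: #Para la fila.
--         eje = coordenada[1]
--         eje_inicial = coordenada_inicial[1]
--     else:
--         eje = coordenada[0]
--         eje_inicial = coordenada_inicial[0]
--
--
--     for i in range(len(matriz)):
--         resultado = eje_inicial + aumento
--         if eje == eje_inicial:
--             return i
--         elif resultado > eje:
--             return i
--         else:
--             eje_inicial += aumento
--
--     return -1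
-- ===== SOURCE B (Python) =====
-- def convertir_coordenada(coordenada, coordenada_inicial, aumento, matriz, sentido=False):
--     eje = coordenada[1] if sentido else coordenada[0]
--     eje_inicial = coordenada_inicial[1] if sentido else coordenada_inicial[0]
--     indice = max(0, (eje - eje_inicial) // aumento)
--     return indice if indice < len(matriz) else -1
-- ===== Notes on version B (the rewrite author's own statement) =====
-- stated objective: simpler
-- what changed: Replaced the per-row scan that steps eje_inicial by aumento with a single floor division plus a bounds check; Pre_ restricts to the function's natural domain of positive grid spacing (aumento > 0), where a coordinate-to-cell conversion is meaningful, so B need not mirror A's degenerate scan for aumento <= 0.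
-- outside the precondition, e.g. on convertir_coordenada((3,), (0,), 0, [1, 2, 3], False): A returns -1, B raises ZeroDivisionError; on convertir_coordenada((3,), (9,), -2, [1, 2, 3], False): A returns 0, B returns -1
import Mathlib
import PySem

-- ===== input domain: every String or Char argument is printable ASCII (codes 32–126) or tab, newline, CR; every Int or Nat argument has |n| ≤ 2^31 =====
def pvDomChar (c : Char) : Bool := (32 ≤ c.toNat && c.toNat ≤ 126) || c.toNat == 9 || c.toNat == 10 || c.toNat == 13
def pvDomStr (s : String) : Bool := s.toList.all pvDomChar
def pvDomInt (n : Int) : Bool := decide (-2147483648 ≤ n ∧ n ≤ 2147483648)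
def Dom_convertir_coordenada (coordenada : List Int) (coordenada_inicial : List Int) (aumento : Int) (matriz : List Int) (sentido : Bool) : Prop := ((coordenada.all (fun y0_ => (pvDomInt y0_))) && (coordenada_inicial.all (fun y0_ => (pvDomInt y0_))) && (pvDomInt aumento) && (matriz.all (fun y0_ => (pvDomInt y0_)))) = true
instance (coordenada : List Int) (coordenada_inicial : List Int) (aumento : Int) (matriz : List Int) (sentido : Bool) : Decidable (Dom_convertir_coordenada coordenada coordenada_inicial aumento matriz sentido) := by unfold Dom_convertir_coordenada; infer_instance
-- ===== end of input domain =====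

-- B replaces A's per-row stepping scan with one floor division and a bounds check; proved equal on the natural domain of positive grid spacing (Pre_: aumento > 0).
-- ===== PORT A =====
-- the for-loop over range(len(matriz)) carrying (eje_inicial, i); returns -1 when the range is exhausted
def pvLoopA (eje aumento : Int) : Nat → Int → Int → Int
  | 0, _, _ => -1
  | Nat.succ n, eje_inicial, i =>
    -- resultado = eje_inicial + aumento
    if eje = eje_inicial then i
    else if eje_inicial + aumento > eje then i
    else pvLoopA eje aumento n (eje_inicial + aumento) (i + 1)

def convertir_coordenada (coordenada : List Int) (coordenada_inicial : List Int) (aumento : Int) (matriz : List Int) (sentido : Bool) : Int :=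
  match (if sentido then PySem.List.pyGet? coordenada 1 else PySem.List.pyGet? coordenada 0),
        (if sentido then PySem.List.pyGet? coordenada_inicial 1 else PySem.List.pyGet? coordenada_inicial 0) with
  | some eje, some eje_inicial => pvLoopA eje aumento matriz.length eje_inicial 0
  | _, _ => 0  -- IndexError; excluded by Pre_

-- ===== PORT B =====
def convertir_coordenada_alt (coordenada : List Int) (coordenada_inicial : List Int) (aumento : Int) (matriz : List Int) (sentido : Bool) : Int :=
  match (if sentido then PySem.List.pyGet? coordenada 1 else PySem.List.pyGet? coordenada 0) with
  | none => 0  -- IndexError; excluded by Pre_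
  | some eje =>
    match (if sentido then PySem.List.pyGet? coordenada_inicial 1 else PySem.List.pyGet? coordenada_inicial 0) with
    | none => 0  -- IndexError; excluded by Pre_
    | some eje_inicial =>
        let indice := max 0 (PySem.Int.floordiv (eje - eje_inicial) aumento)
        if indice < (matriz.length : Int) then indice else -1

-- ===== PRECONDITION & SPEC =====
-- Pre_ excludes the inputs on which A raises IndexError (the indexed coordinate missing), and restricts
-- aumento to the function's natural domain of positive grid spacing (a pixel-to-cell conversion needs
-- aumento > 0; for aumento ≤ 0 A's scan is degenerate and B's floor division would divide by zero or differ).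
def Pre_convertir_coordenada (coordenada : List Int) (coordenada_inicial : List Int) (aumento : Int) (matriz : List Int) (sentido : Bool) : Prop :=
  (if sentido then 2 else 1) ≤ coordenada.length ∧ (if sentido then 2 else 1) ≤ coordenada_inicial.length ∧ 0 < aumento
instance (coordenada : List Int) (coordenada_inicial : List Int) (aumento : Int) (matriz : List Int) (sentido : Bool) : Decidable (Pre_convertir_coordenada coordenada coordenada_inicial aumento matriz sentido) := by unfold Pre_convertir_coordenada; infer_instance
def pvWitness_convertir_coordenada : List Int × List Int × Int × List Int × Bool := ([3, 7], [0, 1], 2, [0, 0, 0, 0], true)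
def Spec_convertir_coordenada (coordenada : List Int) (coordenada_inicial : List Int) (aumento : Int) (matriz : List Int) (sentido : Bool) (out : Int) : Prop := out = convertir_coordenada_alt coordenada coordenada_inicial aumento matriz sentido
instance (coordenada : List Int) (coordenada_inicial : List Int) (aumento : Int) (matriz : List Int) (sentido : Bool) (out : Int) : Decidable (Spec_convertir_coordenada coordenada coordenada_inicial aumento matriz sentido out) := by unfold Spec_convertir_coordenada; infer_instance

-- ===== CLAIM (what is proved, stated in full; the proofs are below) =====
def Claim_equal_convertir_coordenada : Prop := ∀ (coordenada : List Int) (coordenada_inicial : List Int) (aumento : Int) (matriz : List Int) (sentido : Bool), Dom_convertir_coordenada coordenada coordenada_inicial aumento matriz sentido → Pre_convertir_coordenada coordenada coordenada_inicial aumento matriz sentido → Spec_convertir_coordenada coordenada coordenada_inicial aumento matriz sentido (convertir_coordenada coordenada coordenada_inicial aumento matriz sentido)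

-- ===== LEMMAS AND PROOFS =====

lemma pv_fd_sub (d a : Int) (ha : a ≠ 0) :
    PySem.Int.floordiv (d - a) a = PySem.Int.floordiv d a - 1 := by
  show Int.fdiv (d - a) a = Int.fdiv d a - 1
  have h : d - a = d + (-1) * a := by ring
  rw [h, Int.add_mul_fdiv_right d (-1) ha]
  omega

-- A's loop, in closed form for positive aumento
lemma pvLoopA_closed (eje a : Int) (ha : 0 < a) : ∀ (n : Nat) (ini i : Int),
    pvLoopA eje a n ini i =
      (let k := max 0 (PySem.Int.floordiv (eje - ini) a)
       if k < (n : Int) then i + k else -1) := by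
  intro n
  induction n with
  | zero =>
    intro ini i
    simp only [pvLoopA]
    simp
  | succ n ih =>
    intro ini i
    simp only [pvLoopA]
    by_cases h0 : eje = ini
    · have : PySem.Int.floordiv (eje - ini) a = 0 := by
        rw [h0]; simp [PySem.Int.floordiv, Int.fdiv]
      rw [if_pos h0]
      simp [this]
    · rw [if_neg h0]
      by_cases h1 : ini + a > eje
      · have hk : max 0 (PySem.Int.floordiv (eje - ini) a) = 0 := by
          have hlt : PySem.Int.floordiv (eje - ini) a < 1 :=
            (PySem.Int.floordiv_lt_iff_lt_mul ha).mpr (by omega)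
          omega
        rw [if_pos h1]
        simp [hk]
      · have hge : a ≤ eje - ini := by omega
        have hF : 1 ≤ PySem.Int.floordiv (eje - ini) a :=
          (PySem.Int.le_floordiv_iff_mul_le ha).mpr (by omega)
        rw [if_neg h1, ih (ini + a) (i + 1)]
        have harg : eje - (ini + a) = (eje - ini) - a := by ring
        rw [harg, pv_fd_sub (eje - ini) a (by omega)]
        have hmax1 : max 0 (PySem.Int.floordiv (eje - ini) a - 1) = PySem.Int.floordiv (eje - ini) a - 1 := by omega
        have hmax2 : max 0 (PySem.Int.floordiv (eje - ini) a) = PySem.Int.floordiv (eje - ini) a := by omega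
        simp only [hmax1, hmax2]
        have hcast : ((n + 1 : Nat) : Int) = (n : Int) + 1 := by push_cast; ring
        rw [hcast]
        split_ifs with hA hB hC
        · ring
        · exfalso; omega
        · exfalso; omega
        · rfl

-- ===== VERDICT (by name: the statement is the Claim_ definition above) =====
theorem convertir_coordenada_spec : Claim_equal_convertir_coordenada := by
  intro coordenada coordenada_inicial aumento matriz sentido hdom hpre
  obtain ⟨hc, hci, ha⟩ := hpre
  unfold Spec_convertir_coordenada convertir_coordenada convertir_coordenada_alt
  obtain ⟨eje, heje⟩ : ∃ x, (if sentido then PySem.List.pyGet? coordenada 1 else PySem.List.pyGet? coordenada 0) = some x := by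
    cases sentido <;> simp only [ite_true, Bool.false_eq_true, ite_false] <;> simp at hc
    · exact ⟨_, PySem.List.pyGet?_ofNat coordenada 0 (by omega)⟩
    · exact ⟨_, PySem.List.pyGet?_ofNat coordenada 1 (by omega)⟩
  obtain ⟨ini, hini⟩ : ∃ x, (if sentido then PySem.List.pyGet? coordenada_inicial 1 else PySem.List.pyGet? coordenada_inicial 0) = some x := by
    cases sentido <;> simp only [ite_true, Bool.false_eq_true, ite_false] <;> simp at hci
    · exact ⟨_, PySem.List.pyGet?_ofNat coordenada_inicial 0 (by omega)⟩
    · exact ⟨_, PySem.List.pyGet?_ofNat coordenada_inicial 1 (by omega)⟩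
  simp only [heje, hini]
  rw [pvLoopA_closed eje aumento ha]
  simp
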